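-- pv_equiv track=rewrite | github.com/Vargha-Kh/Deep-Learning-Practices | Category Id Counter in Json Removing Duplicates/Count Exercise.py | block_calculator
-- ===== SOURCE A (Python) =====
-- from collections import defaultdict
--
-- def block_calculator(data1):
--     shirt = 0
--     tshirt = 0
--     pants = 0
--     image_set = defaultdict(set)
--     for key1 in data1["annotations"]:
--         img_id = key1['image_id']
--         v = key1["category_id"]
--         image_set[img_id].add(v)
--     for k, i in image_set.items():
--         for f in i:
--             if f == 1:
--                 shirt = shirt + 1
--             if f == 2:
--                 tshirt = tshirt + 1
--             if f == 3:
--                 pants = pants + 1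
--     image_set.clear()
--     return shirt, tshirt, pants
-- ===== SOURCE B (Python) =====
-- def block_calculator(data1):
--     shirt = 0
--     tshirt = 0
--     pants = 0
--     seen = set()
--     for key1 in data1["annotations"]:
--         pair = (key1['image_id'], key1["category_id"])
--         if pair not in seen:
--             seen.add(pair)
--             if pair[1] == 1:
--                 shirt += 1
--             elif pair[1] == 2:
--                 tshirt += 1
--             elif pair[1] == 3:
--                 pants += 1
--     return shirt, tshirt, pants
-- ===== Notes on version B (the rewrite author's own statement) =====
-- stated objective: simpler
-- what changed: A builds a defaultdict mapping image_id to a set of category_ids and then rescans the whole dict in a second nested pass to count; B collapses this into a single pass over the annotations with one seen-set of (image_id, category_id) pairs, incrementing a counter the moment a new pair is seen.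
import Mathlib
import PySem

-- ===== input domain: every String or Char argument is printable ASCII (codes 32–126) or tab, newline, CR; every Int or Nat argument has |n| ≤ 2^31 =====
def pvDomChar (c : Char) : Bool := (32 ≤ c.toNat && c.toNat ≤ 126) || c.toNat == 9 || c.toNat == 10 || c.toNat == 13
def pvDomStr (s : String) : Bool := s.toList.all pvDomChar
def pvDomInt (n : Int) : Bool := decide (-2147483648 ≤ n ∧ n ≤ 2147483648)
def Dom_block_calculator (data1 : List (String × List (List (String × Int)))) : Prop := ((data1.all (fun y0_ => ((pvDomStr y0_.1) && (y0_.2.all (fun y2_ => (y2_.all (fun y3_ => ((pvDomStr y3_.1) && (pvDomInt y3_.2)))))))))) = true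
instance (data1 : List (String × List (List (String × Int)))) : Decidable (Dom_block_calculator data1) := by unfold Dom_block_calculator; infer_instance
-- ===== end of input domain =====

-- B replaces A's two-phase design (build a defaultdict image_id -> set of categories, then rescan it)
-- with a single pass over the annotations keeping one seen-set of (image_id, category_id) pairs: simpler.

-- ===== PORT A =====
def block_calculator (data1 : List (String × List (List (String × Int)))) : Int × Int × Int :=
  let anns := (PySem.Dict.mk data1).getD "annotations" []
  let image_set : PySem.Dict Int (PySem.Set Int) :=
    anns.foldl (fun d key1 =>
      let img_id := (PySem.Dict.mk key1).getD "image_id" 0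
      let v := (PySem.Dict.mk key1).getD "category_id" 0
      d.modify img_id PySem.Set.empty (fun s => s.add v)) PySem.Dict.empty
  image_set.items.foldl (fun acc ki =>
    ki.2.foldl (fun (acc : Int × Int × Int) f =>
      let acc1 := if f = 1 then (acc.1 + 1, acc.2.1, acc.2.2) else acc
      let acc2 := if f = 2 then (acc1.1, acc1.2.1 + 1, acc1.2.2) else acc1
      if f = 3 then (acc2.1, acc2.2.1, acc2.2.2 + 1) else acc2) acc) (0, 0, 0)

-- ===== PORT B =====
def block_calculator_alt (data1 : List (String × List (List (String × Int)))) : Int × Int × Int :=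
  let anns := (PySem.Dict.mk data1).getD "annotations" []
  let st := anns.foldl (fun (st : PySem.Set (Int × Int) × Int × Int × Int) key1 =>
    let pair := ((PySem.Dict.mk key1).getD "image_id" 0, (PySem.Dict.mk key1).getD "category_id" 0)
    if st.1.contains pair then st
    else (st.1.add pair,
      if pair.2 = 1 then (st.2.1 + 1, st.2.2.1, st.2.2.2)
      else if pair.2 = 2 then (st.2.1, st.2.2.1 + 1, st.2.2.2)
      else if pair.2 = 3 then (st.2.1, st.2.2.1, st.2.2.2 + 1)
      else st.2)) (PySem.Set.empty, 0, 0, 0)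
  st.2

-- ===== PRECONDITION & SPEC =====
-- Pre_ excludes exactly the inputs where the Python raises KeyError: a missing "annotations" key,
-- or an annotation missing "image_id" or "category_id".
def Pre_block_calculator (data1 : List (String × List (List (String × Int)))) : Prop :=
  (data1.find? (fun p => p.1 == "annotations")).isSome = true ∧
  ∀ key1 ∈ (PySem.Dict.mk data1).getD "annotations" [],
    (key1.find? (fun p => p.1 == "image_id")).isSome = true ∧
    (key1.find? (fun p => p.1 == "category_id")).isSome = true
instance (data1 : List (String × List (List (String × Int)))) : Decidable (Pre_block_calculator data1) := by unfold Pre_block_calculator; infer_instance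

def pvWitness_block_calculator : (List (String × List (List (String × Int)))) :=
  [("annotations", [[("image_id", 1), ("category_id", 2)], [("image_id", 1), ("category_id", 2)], [("image_id", 2), ("category_id", 1)]])]

def Spec_block_calculator (data1 : List (String × List (List (String × Int)))) (out : Int × Int × Int) : Prop := out = block_calculator_alt data1
instance (data1 : List (String × List (List (String × Int)))) (out : Int × Int × Int) : Decidable (Spec_block_calculator data1 out) := by unfold Spec_block_calculator; infer_instance

-- ===== CLAIM (what is proved, stated in full; the proofs are below) =====
def Claim_equal_block_calculator : Prop := ∀ (data1 : List (String × List (List (String × Int)))), Dom_block_calculator data1 → Pre_block_calculator data1 → Spec_block_calculator data1 (block_calculator data1)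

-- ===== LEMMAS AND PROOFS =====

-- the (image_id, category_id) pair an annotation dict contributes
def pvPair (key1 : List (String × Int)) : Int × Int :=
  ((PySem.Dict.mk key1).getD "image_id" 0, (PySem.Dict.mk key1).getD "category_id" 0)

def pvStepA (d : PySem.Dict Int (PySem.Set Int)) (p : Int × Int) : PySem.Dict Int (PySem.Set Int) :=
  d.modify p.1 PySem.Set.empty (fun s => s.add p.2)

def pvStepB (st : PySem.Set (Int × Int) × Int × Int × Int) (p : Int × Int) :
    PySem.Set (Int × Int) × Int × Int × Int :=
  if st.1.contains p then st
  else (st.1.add p,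
    if p.2 = 1 then (st.2.1 + 1, st.2.2.1, st.2.2.2)
    else if p.2 = 2 then (st.2.1, st.2.2.1 + 1, st.2.2.2)
    else if p.2 = 3 then (st.2.1, st.2.2.1, st.2.2.2 + 1)
    else st.2)

-- total count of category c over all sets of the dict
def pvCnt (c : Int) (d : PySem.Dict Int (PySem.Set Int)) : Int :=
  (d.items.map (fun q => ((q.2.count c : Nat) : Int))).sum

lemma pvInnerFold (s : List Int) : ∀ acc : Int × Int × Int,
    s.foldl (fun (acc : Int × Int × Int) f =>
      let acc1 := if f = 1 then (acc.1 + 1, acc.2.1, acc.2.2) else acc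
      let acc2 := if f = 2 then (acc1.1, acc1.2.1 + 1, acc1.2.2) else acc1
      if f = 3 then (acc2.1, acc2.2.1, acc2.2.2 + 1) else acc2) acc
    = (acc.1 + (s.count 1 : Nat), acc.2.1 + (s.count 2 : Nat), acc.2.2 + (s.count 3 : Nat)) := by
  induction s with
  | nil => intro acc; simp
  | cons f t ih =>
    intro acc
    obtain ⟨a, b, c⟩ := acc
    simp only [List.foldl_cons, ih, List.count_cons]
    by_cases h1 : f = 1 <;> by_cases h2 : f = 2 <;> by_cases h3 : f = 3 <;>
      simp_all <;> omega

lemma pvOuterFold (l : List (Int × PySem.Set Int)) : ∀ acc : Int × Int × Int,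
    l.foldl (fun acc ki =>
      ki.2.foldl (fun (acc : Int × Int × Int) f =>
        let acc1 := if f = 1 then (acc.1 + 1, acc.2.1, acc.2.2) else acc
        let acc2 := if f = 2 then (acc1.1, acc1.2.1 + 1, acc1.2.2) else acc1
        if f = 3 then (acc2.1, acc2.2.1, acc2.2.2 + 1) else acc2) acc) acc
    = (acc.1 + (l.map (fun q => ((q.2.count 1 : Nat) : Int))).sum,
       acc.2.1 + (l.map (fun q => ((q.2.count 2 : Nat) : Int))).sum,
       acc.2.2 + (l.map (fun q => ((q.2.count 3 : Nat) : Int))).sum) := by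
  induction l with
  | nil => intro acc; simp
  | cons ki t ih =>
    intro acc
    rw [List.foldl_cons, ih]
    obtain ⟨a, b, c⟩ := acc
    simp only [pvInnerFold, List.map_cons, List.sum_cons]
    refine Prod.ext ?_ (Prod.ext ?_ ?_) <;> simp <;> ring

lemma pvSumMapReplace (c : Int) : ∀ (l : List (Int × PySem.Set Int)) (k : Int) (s' v : PySem.Set Int),
    (l.map (·.1)).Nodup → (k, v) ∈ l →
    ((l.map (fun p => if p.1 == k then (k, s') else p)).map (fun q => ((q.2.count c : Nat) : Int))).sum
      = (l.map (fun q => ((q.2.count c : Nat) : Int))).sum + (s'.count c : Nat) - (v.count c : Nat) := by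
  intro l
  induction l with
  | nil => intro k s' v _ hm; simp at hm
  | cons a t ih =>
    intro k s' v hnd hm
    simp only [List.map_cons, List.nodup_cons] at hnd ⊢
    by_cases hk : a.1 = k
    · have hnotin : ∀ p ∈ t, p.1 ≠ k := by
        intro p hp hpk
        apply hnd.1
        rw [hk, ← hpk]
        exact List.mem_map_of_mem hp
      have hav : a = (k, v) := by
        rcases List.mem_cons.1 hm with h | h
        · exact h.symm
        · exact absurd rfl (hnotin (k, v) h)
      have htid : t.map (fun p => if p.1 == k then (k, s') else p) = t := by
        apply List.map_congr_left ?_ |>.trans (List.map_id t)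
        intro p hp; simp [hnotin p hp]
      have hcond : (a.1 == k) = true := by simp [hk]
      simp only [List.sum_cons, hcond, reduceIte, htid]
      rw [hav]
      simp; ring
    · have hm' : (k, v) ∈ t := by
        rcases List.mem_cons.1 hm with h | h
        · exact absurd (congrArg Prod.fst h).symm hk
        · exact h
      have hcond : (a.1 == k) = false := by simp [hk]
      simp only [List.sum_cons, hcond, Bool.false_eq_true, if_false]
      rw [ih k s' v hnd.2 hm']
      ring

lemma pvCntInsert (c : Int) (d : PySem.Dict Int (PySem.Set Int)) (k : Int) (s' : PySem.Set Int)
    (hnd : d.keys.Nodup) :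
    pvCnt c (d.insert k s')
      = pvCnt c d + ((s'.count c : Nat) : Int) - (((d.getD k PySem.Set.empty).count c : Nat) : Int) := by
  by_cases h : d.contains k = true
  · have hkmem : k ∈ d.keys := (PySem.Dict.contains_iff_mem_keys d k).1 h
    obtain ⟨p, hp, hpk⟩ := List.mem_map.1 hkmem
    obtain ⟨k2, v⟩ := p
    have hk2 : k2 = k := hpk
    subst hk2
    have hgd : d.getD k2 PySem.Set.empty = v := PySem.Dict.getD_of_mem_items d hp hnd _
    unfold pvCnt
    rw [PySem.Dict.items_insert_of_contains d s' h, hgd]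
    exact pvSumMapReplace c d.items k2 s' v hnd hp
  · have h' : d.contains k = false := by simpa using h
    unfold pvCnt
    rw [PySem.Dict.items_insert_of_not_contains d s' h',
        PySem.Dict.getD_of_not_contains d _ h']
    simp [PySem.Set.empty]

lemma pvMainInv : ∀ (ps : List (Int × Int)) (d : PySem.Dict Int (PySem.Set Int))
    (S : PySem.Set (Int × Int)) (a b c : Int),
    d.keys.Nodup →
    (∀ k v, ((k, v) ∈ S) ↔ v ∈ d.getD k PySem.Set.empty) →
    (ps.foldl pvStepB (S, a, b, c)).2
      = (a + pvCnt 1 (ps.foldl pvStepA d) - pvCnt 1 d,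
         b + pvCnt 2 (ps.foldl pvStepA d) - pvCnt 2 d,
         c + pvCnt 3 (ps.foldl pvStepA d) - pvCnt 3 d) := by
  intro ps
  induction ps with
  | nil => intro d S a b c _ _; simp
  | cons p t ih =>
    intro d S a b c hnd hS
    obtain ⟨k, v⟩ := p
    have hdef : pvStepA d (k, v) = d.insert k ((d.getD k PySem.Set.empty).add v) := rfl
    have hnd' : (pvStepA d (k, v)).keys.Nodup := by
      rw [hdef]; exact PySem.Dict.nodup_keys_insert d k _ hnd
    have hcnt : ∀ cc, pvCnt cc (pvStepA d (k, v))
        = pvCnt cc d + (((d.getD k PySem.Set.empty).add v).count cc : Nat)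
            - ((d.getD k PySem.Set.empty).count cc : Nat) := by
      intro cc; rw [hdef]; exact pvCntInsert cc d k _ hnd
    by_cases hmem : (k, v) ∈ S
    · have hv : v ∈ d.getD k PySem.Set.empty := (hS k v).1 hmem
      have hadd : (d.getD k PySem.Set.empty).add v = d.getD k PySem.Set.empty :=
        PySem.Set.add_of_mem hv
      have hstep : pvStepB (S, a, b, c) (k, v) = (S, a, b, c) := by
        have hc0 : S.contains (k, v) = true := (PySem.Set.contains_iff S (k, v)).2 hmem
        unfold pvStepB
        rw [hc0]
        simp
      have hS' : ∀ k' v', ((k', v') ∈ S) ↔ v' ∈ (pvStepA d (k, v)).getD k' PySem.Set.empty := by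
        intro k' v'
        rw [hdef, hadd, PySem.Dict.getD_insert]
        split_ifs with he
        · subst he; exact hS k' v'
        · exact hS k' v'
      have hc : ∀ cc, pvCnt cc (pvStepA d (k, v)) = pvCnt cc d := by
        intro cc; rw [hcnt cc, hadd]; ring
      simp only [List.foldl_cons, hstep, ih _ S a b c hnd' hS', hc]
    · have hv : v ∉ d.getD k PySem.Set.empty := fun h => hmem ((hS k v).2 h)
      have hcontains : S.contains (k, v) = false := by
        cases hcon : S.contains (k, v)
        · rfl
        · exact absurd ((PySem.Set.contains_iff S (k, v)).1 hcon) hmem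
      have hadd : (d.getD k PySem.Set.empty).add v = d.getD k PySem.Set.empty ++ [v] :=
        PySem.Set.add_of_not_mem hv
      have hcv : ∀ cc, (((d.getD k PySem.Set.empty).add v).count cc : Nat)
          = ((d.getD k PySem.Set.empty).count cc : Nat) + (if v = cc then 1 else 0) := by
        intro cc; rw [hadd, List.count_append]
        by_cases hvc : v = cc <;> simp [hvc]
      have hstep : pvStepB (S, a, b, c) (k, v)
          = (S.add (k, v),
             if v = 1 then (a + 1, b, c)
             else if v = 2 then (a, b + 1, c)
             else if v = 3 then (a, b, c + 1)
             else (a, b, c)) := by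
        unfold pvStepB
        rw [hcontains]
        simp
      have hS' : ∀ k' v', ((k', v') ∈ S.add (k, v)) ↔ v' ∈ (pvStepA d (k, v)).getD k' PySem.Set.empty := by
        intro k' v'
        rw [hdef, PySem.Dict.getD_insert, PySem.Set.mem_add]
        split_ifs with he
        · subst he
          rw [PySem.Set.mem_add]
          constructor
          · rintro (h | h)
            · exact Or.inl ((hS k' v').1 h)
            · rw [Prod.mk.injEq] at h; exact Or.inr h.2
          · rintro (h | h)
            · exact Or.inl ((hS k' v').2 h)
            · exact Or.inr (by rw [h])
        · constructor
          · rintro (h | h)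
            · exact (hS k' v').1 h
            · exact absurd (congrArg Prod.fst h) he
          · intro h; exact Or.inl ((hS k' v').2 h)
      have hc : ∀ cc, pvCnt cc (pvStepA d (k, v)) = pvCnt cc d + (if v = cc then 1 else 0) := by
        intro cc; rw [hcnt cc, hcv cc]; push_cast; ring
      simp only [List.foldl_cons, hstep]
      rw [ih _ (S.add (k, v)) _ _ _ hnd' hS']
      have e1 := hc 1; have e2 := hc 2; have e3 := hc 3
      have goalify : ∀ x1 x2 x3 y1 y2 y3 : Int, x1 = y1 → x2 = y2 → x3 = y3 →
          ((x1, x2, x3) : Int × Int × Int) = (y1, y2, y3) := by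
        intros; subst_vars; rfl
      split_ifs with h1 h2 h3
      · subst h1; norm_num at e1 e2 e3
        exact goalify _ _ _ _ _ _ (by omega) (by omega) (by omega)
      · subst h2; norm_num at e1 e2 e3
        exact goalify _ _ _ _ _ _ (by omega) (by omega) (by omega)
      · subst h3; norm_num at e1 e2 e3
        exact goalify _ _ _ _ _ _ (by omega) (by omega) (by omega)
      · norm_num [h1, h2, h3] at e1 e2 e3
        exact goalify _ _ _ _ _ _ (by omega) (by omega) (by omega)

lemma pvEmptyNodup : (PySem.Dict.empty : PySem.Dict Int (PySem.Set Int)).keys.Nodup := by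
  simp [PySem.Dict.empty, PySem.Dict.keys]

lemma pvEmptyInv : ∀ (k v : Int), ((k, v) ∈ (PySem.Set.empty : PySem.Set (Int × Int)))
    ↔ v ∈ (PySem.Dict.empty : PySem.Dict Int (PySem.Set Int)).getD k PySem.Set.empty := by
  intro k v; simp [PySem.Set.empty, PySem.Dict.getD_empty]

-- ===== VERDICT (by name: the statement is the Claim_ definition above) =====
theorem block_calculator_spec : Claim_equal_block_calculator := by
  intro data1 _ _
  unfold Spec_block_calculator block_calculator block_calculator_alt
  set anns := (PySem.Dict.mk data1).getD "annotations" [] with hanns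
  have hA : (anns.foldl (fun d key1 =>
      let img_id := (PySem.Dict.mk key1).getD "image_id" 0
      let v := (PySem.Dict.mk key1).getD "category_id" 0
      d.modify img_id PySem.Set.empty (fun s => s.add v)) PySem.Dict.empty)
      = (anns.map pvPair).foldl pvStepA PySem.Dict.empty := by
    rw [List.foldl_map]; rfl
  have hB : (anns.foldl (fun (st : PySem.Set (Int × Int) × Int × Int × Int) key1 =>
      let pair := ((PySem.Dict.mk key1).getD "image_id" 0, (PySem.Dict.mk key1).getD "category_id" 0)
      if st.1.contains pair then st
      else (st.1.add pair,
        if pair.2 = 1 then (st.2.1 + 1, st.2.2.1, st.2.2.2)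
        else if pair.2 = 2 then (st.2.1, st.2.2.1 + 1, st.2.2.2)
        else if pair.2 = 3 then (st.2.1, st.2.2.1, st.2.2.2 + 1)
        else st.2)) (PySem.Set.empty, 0, 0, 0))
      = (anns.map pvPair).foldl pvStepB (PySem.Set.empty, 0, 0, 0) := by
    rw [List.foldl_map]; rfl
  simp only [hA, hB]
  rw [pvOuterFold, pvMainInv (anns.map pvPair) PySem.Dict.empty PySem.Set.empty 0 0 0 pvEmptyNodup pvEmptyInv]
  simp [pvCnt, PySem.Dict.empty]
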